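-- pv_equiv track=rewrite | github.com/jgerstmayr/EXUDYN | main/src/pythonGenerator/doc2rst.py | SectionNameToFileName
-- ===== SOURCE A (Python) =====
-- def SectionNameToFileName(sectionName):
--     sNew = ''
--     for i in range(len(sectionName)):
--         c = sectionName[i]
--         if i > 0:
--             if sectionName[i-1] == ' ':
--                 c = c.upper()
--         sNew += c
--
--     s = sNew.replace(' ','').replace('?','').replace('-','').replace('+','').replace(':','').replace(',','').replace('.','')
--     return s[0].upper() + s[1:]
-- ===== SOURCE B (Python) =====
-- def SectionNameToFileName(sectionName):
--     out = []
--     prev_space = False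
--     for c in sectionName:
--         d = c.upper() if prev_space else c
--         if d not in ' ?-+:,.':
--             out.append(d)
--         prev_space = c == ' '
--     return out[0].upper() + ''.join(out[1:])
-- ===== Notes on version B (the rewrite author's own statement) =====
-- stated objective: simpler
-- what changed: One forward pass with a previous-was-space flag that uppercases after spaces and drops punctuation inline, replacing A's index-based look-back loop followed by seven separate replace passes.
-- outside the precondition, e.g. on SectionNameToFileName(' ?-+:,.'): A raises IndexError, B raises IndexError
import Mathlib
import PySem

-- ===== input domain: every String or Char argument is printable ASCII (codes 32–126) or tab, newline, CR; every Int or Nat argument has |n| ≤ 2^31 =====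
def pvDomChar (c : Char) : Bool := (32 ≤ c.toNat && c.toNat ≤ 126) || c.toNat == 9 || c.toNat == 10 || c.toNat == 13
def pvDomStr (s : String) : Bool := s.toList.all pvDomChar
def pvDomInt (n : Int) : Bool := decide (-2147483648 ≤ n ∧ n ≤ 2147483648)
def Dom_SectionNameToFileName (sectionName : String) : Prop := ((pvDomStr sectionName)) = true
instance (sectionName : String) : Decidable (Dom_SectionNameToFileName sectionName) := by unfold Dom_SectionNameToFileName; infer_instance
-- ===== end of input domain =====

-- B replaces A's index-based look-back loop plus seven chained replace passes by one
-- forward pass with a previous-was-space flag that uppercases and filters inline (objective: simpler).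

-- ===== PORT A =====
def SectionNameToFileName (sectionName : String) : String :=
  let cs := sectionName.toList
  let sNew : List Char :=
    (PySem.List.pyRange 0 (PySem.Str.len sectionName) 1).foldl
      (fun sNew i =>
        let c := PySem.List.pyGetD cs i ' '
        let c := if 0 < i then
            (if PySem.List.pyGetD cs (i - 1) ' ' = ' ' then PySem.Chars.upperChar c else c)
          else c
        sNew ++ [c]) []
  let s := PySem.Chars.replace (PySem.Chars.replace (PySem.Chars.replace (PySem.Chars.replace
            (PySem.Chars.replace (PySem.Chars.replace (PySem.Chars.replace sNew
            [' '] []) ['?'] []) ['-'] []) ['+'] []) [':'] []) [','] []) ['.'] []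
  match PySem.List.pyGet? s 0 with
  | some c => String.ofList (PySem.Chars.upperChar c :: PySem.List.slice s (some 1) none)
  | none => ""  -- s[0] is an IndexError in Python; excluded by Pre_

-- ===== PORT B =====
def SectionNameToFileName_alt (sectionName : String) : String :=
  let st := sectionName.toList.foldl
    (fun (st : List Char × Bool) c =>
      let d := if st.2 then PySem.Chars.upperChar c else c
      ((if d ∈ ([' ', '?', '-', '+', ':', ',', '.'] : List Char) then st.1 else st.1 ++ [d]),
       c == ' '))
    ([], false)
  let out := st.1
  match PySem.List.pyGet? out 0 with
  | some c => String.ofList (PySem.Chars.upperChar c :: PySem.List.slice out (some 1) none)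
  | none => ""  -- out[0] is an IndexError in Python; excluded by Pre_

-- ===== PRECONDITION & SPEC =====
-- Pre_ excludes exactly the inputs where A (and B) raise IndexError: strings whose
-- characters are all in " ?-+:,.", so that nothing is left after stripping.
def Pre_SectionNameToFileName (sectionName : String) : Prop :=
  sectionName.toList.any (fun c => decide (c ∉ ([' ', '?', '-', '+', ':', ',', '.'] : List Char))) = true
instance (sectionName : String) : Decidable (Pre_SectionNameToFileName sectionName) := by
  unfold Pre_SectionNameToFileName; infer_instance
def pvWitness_SectionNameToFileName : String := "a b"
def Spec_SectionNameToFileName (sectionName : String) (out : String) : Prop := out = SectionNameToFileName_alt sectionName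
instance (sectionName : String) (out : String) : Decidable (Spec_SectionNameToFileName sectionName out) := by unfold Spec_SectionNameToFileName; infer_instance

-- ===== CLAIM (what is proved, stated in full; the proofs are below) =====
def Claim_equal_SectionNameToFileName : Prop := ∀ (sectionName : String), Dom_SectionNameToFileName sectionName → Pre_SectionNameToFileName sectionName → Spec_SectionNameToFileName sectionName (SectionNameToFileName sectionName)

-- ===== LEMMAS AND PROOFS =====

-- the per-character transform both programs perform before stripping: uppercase a
-- character whose predecessor is a space
def pvMapUp : Bool → List Char → List Char
  | _, [] => []
  | p, c :: rest => (if p then PySem.Chars.upperChar c else c) :: pvMapUp (c == ' ') rest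

def pvLastFlag (p : Bool) (xs : List Char) : Bool :=
  match xs.getLast? with
  | some c => c == ' '
  | none => p

def pvKeep (d : Char) : Bool := !(decide (d ∈ ([' ', '?', '-', '+', ':', ',', '.'] : List Char)))

theorem pvLastFlag_cons (p : Bool) (c : Char) (xs : List Char) :
    pvLastFlag p (c :: xs) = pvLastFlag (c == ' ') xs := by
  cases xs with
  | nil => simp [pvLastFlag]
  | cons y ys =>
    cases h : (y :: ys).getLast? with
    | none => simp at h
    | some z => simp [pvLastFlag, List.getLast?_cons_cons, h]

theorem pvMapUp_append (p : Bool) (xs : List Char) (x : Char) :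
    pvMapUp p (xs ++ [x]) =
      pvMapUp p xs ++ [if pvLastFlag p xs then PySem.Chars.upperChar x else x] := by
  induction xs generalizing p with
  | nil => simp [pvMapUp, pvLastFlag]
  | cons c rest ih => simp [pvMapUp, ih, pvLastFlag_cons]

theorem pvLoopA (cs : List Char) (m : Nat) (hm : m ≤ cs.length) :
    (PySem.List.pyRange 0 (m : Int) 1).foldl
      (fun sNew i =>
        sNew ++ [if 0 < i then
            (if PySem.List.pyGetD cs (i - 1) ' ' = ' ' then
              PySem.Chars.upperChar (PySem.List.pyGetD cs i ' ')
             else PySem.List.pyGetD cs i ' ')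
          else PySem.List.pyGetD cs i ' ']) [] = pvMapUp false (cs.take m) := by
  induction m with
  | zero => simp [PySem.List.pyRange, pvMapUp]
  | succ m ih =>
    have hm' : m ≤ cs.length := Nat.le_of_succ_le hm
    have hlt : m < cs.length := hm
    have hsplit : (PySem.List.pyRange 0 ((m + 1 : Nat) : Int) 1) =
        (PySem.List.pyRange 0 (m : Nat) 1) ++ [(m : Int)] := by
      exact_mod_cast PySem.List.pyRange_one_succ_right (a := 0) (b := (m : Int)) (by positivity)
    rw [hsplit, List.foldl_append, ih hm']
    have htake : cs.take (m + 1) = cs.take m ++ [cs[m]] := by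
      rw [List.take_add_one]
      simp [List.getElem?_eq_getElem hlt]
    rw [htake, pvMapUp_append]
    simp only [List.foldl_cons, List.foldl_nil]
    congr 1
    have hflag : pvLastFlag false (cs.take m) =
        if h0 : 0 < m then (cs[m - 1] == ' ') else false := by
      split
      · next h0 =>
        unfold pvLastFlag
        have hgl : (cs.take m).getLast? = some cs[m - 1] := by
          rw [List.getLast?_eq_getElem?]
          have h1 : (cs.take m).length = m := by simp [Nat.min_eq_left hm']
          rw [h1, List.getElem?_take, if_pos (by omega), List.getElem?_eq_getElem (by omega)]
        rw [hgl]
      · next h0 =>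
        have : m = 0 := by omega
        subst this
        simp [pvLastFlag]
    by_cases h0 : 0 < m
    · have hcast : ((m : Int)) - 1 = ((m - 1 : Nat) : Int) := by omega
      rw [hflag]
      simp only [h0, dif_pos]
      have hc : PySem.List.pyGetD cs ((m : Int)) ' ' = cs[m] := by
        rw [PySem.List.pyGetD_natCast, List.getD_eq_getElem?_getD, List.getElem?_eq_getElem hlt]
        rfl
      have hcp : PySem.List.pyGetD cs ((m : Int) - 1) ' ' = cs[m - 1] := by
        rw [hcast, PySem.List.pyGetD_natCast, List.getD_eq_getElem?_getD,
          List.getElem?_eq_getElem (by omega)]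
        rfl
      simp only [hc, hcp]
      have : (0 : Int) < (m : Int) := by exact_mod_cast h0
      rw [if_pos this]
      by_cases he : cs[m - 1] = ' '
      · simp [he]
      · simp [he]
    · have : m = 0 := by omega
      subst this
      rw [hflag]
      simp [PySem.List.pyGetD_zero, List.getD_eq_getElem?_getD, List.getElem?_eq_getElem hlt]

theorem pvReplaceGo (x : Char) (fuel : Nat) :
    ∀ (l acc : List Char), l.length ≤ fuel →
      PySem.Chars.replace.go [x] [] fuel l acc =
        acc.reverse ++ l.filter (fun c => !(c == x)) := by
  induction fuel with
  | zero =>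
    intro l acc h
    have : l = [] := List.eq_nil_of_length_eq_zero (by omega)
    subst this
    simp [PySem.Chars.replace.go]
  | succ fuel ih =>
    intro l acc h
    cases l with
    | nil => simp [PySem.Chars.replace.go]
    | cons c t =>
      rw [PySem.Chars.replace.go]
      by_cases hc : c = x
      · subst hc
        have hpre : [c].isPrefixOf (c :: t) = true := by simp [List.isPrefixOf]
        rw [if_pos hpre]
        show PySem.Chars.replace.go [c] [] fuel t acc = _
        rw [ih t acc (by simpa using Nat.le_of_succ_le_succ h)]
        simp
      · have hpre : [x].isPrefixOf (c :: t) = false := by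
          simp [List.isPrefixOf, Ne.symm hc]
        simp only [hpre, Bool.false_eq_true, if_neg, not_false_iff]
        rw [ih t (c :: acc) (by simpa using Nat.le_of_succ_le_succ h)]
        simp [hc]

theorem pvReplaceFilter (x : Char) (s : List Char) :
    PySem.Chars.replace s [x] [] = s.filter (fun c => !(c == x)) := by
  rw [PySem.Chars.replace]
  simp only [List.isEmpty_cons, Bool.false_eq_true, if_neg, not_false_iff]
  exact pvReplaceGo x s.length s [] (le_refl _)

theorem pvLoopB (cs : List Char) :
    ∀ (p : Bool) (acc : List Char),
      (cs.foldl
        (fun (st : List Char × Bool) c =>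
          ((if (if st.2 then PySem.Chars.upperChar c else c) ∈ ([' ', '?', '-', '+', ':', ',', '.'] : List Char)
            then st.1 else st.1 ++ [if st.2 then PySem.Chars.upperChar c else c]),
           c == ' '))
        (acc, p)).1 = acc ++ (pvMapUp p cs).filter pvKeep := by
  induction cs with
  | nil => intro p acc; simp [pvMapUp]
  | cons c rest ih =>
    intro p acc
    simp only [List.foldl_cons]
    rw [ih]
    by_cases hd : (if p then PySem.Chars.upperChar c else c) ∈ ([' ', '?', '-', '+', ':', ',', '.'] : List Char)
    · simp [pvMapUp, hd, pvKeep]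
    · simp [pvMapUp, hd, pvKeep]

theorem pvFilterChain (l : List Char) :
    ((((((l.filter (fun c => !(c == ' '))).filter (fun c => !(c == '?'))).filter
        (fun c => !(c == '-'))).filter (fun c => !(c == '+'))).filter
        (fun c => !(c == ':'))).filter (fun c => !(c == ','))).filter (fun c => !(c == '.'))
      = l.filter pvKeep := by
  simp only [List.filter_filter]
  apply List.filter_congr
  intro x _
  simp only [pvKeep, List.mem_cons, List.not_mem_nil, or_false, Bool.decide_or,
    Bool.not_or, beq_eq_decide]
  cases decide (x = ' ') <;> cases decide (x = '?') <;> cases decide (x = '-') <;>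
    cases decide (x = '+') <;> cases decide (x = ':') <;> cases decide (x = ',') <;>
    cases decide (x = '.') <;> rfl

-- ===== VERDICT (by name: the statement is the Claim_ definition above) =====
theorem SectionNameToFileName_spec : Claim_equal_SectionNameToFileName := by
  intro sectionName _ _
  show SectionNameToFileName sectionName = SectionNameToFileName_alt sectionName
  simp only [SectionNameToFileName, SectionNameToFileName_alt]
  have hlen : PySem.Str.len sectionName = ((sectionName.toList.length : Nat) : Int) := by
    simp [PySem.Str.len_eq]
  rw [hlen, pvLoopA sectionName.toList sectionName.toList.length (le_refl _), List.take_length]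
  rw [pvReplaceFilter, pvReplaceFilter, pvReplaceFilter, pvReplaceFilter, pvReplaceFilter,
    pvReplaceFilter, pvReplaceFilter, pvFilterChain]
  rw [pvLoopB sectionName.toList false []]
  simp
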